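-- pv_equiv track=rewrite | github.com/sueun-dev/open-seed | packages/brain/src/openseed_brain/nodes/intake.py | _parse_scope
-- ===== SOURCE A (Python) =====
-- def _parse_scope(text: str) -> dict:
--     scope: dict = {"modify": [], "create": [], "do_not_touch": []}
--     in_scope = False
--     for line in text.splitlines():
--         stripped = line.strip()
--         if stripped.upper().startswith("SCOPE:"):
--             in_scope = True
--             continue
--         if in_scope:
--             if any(
--                 stripped.upper().startswith(f"{s}:") for s in ["DONE_WHEN", "QUESTIONS", "PLAN", "LESSONS", "INTENT"]
--             ):
--                 break
--             for key in ["MODIFY", "CREATE", "DO_NOT_TOUCH"]: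
--                 if stripped.upper().startswith(f"- {key}:") or stripped.upper().startswith(f"{key}:"):
--                     val = stripped.split(":", 1)[1].strip()
--                     scope[key.lower()] = [v.strip() for v in val.split(",") if v.strip()]
--                     break
--     return scope
-- ===== SOURCE B (Python) =====
-- def _parse_scope(text: str) -> dict:
--     scope = {"modify": [], "create": [], "do_not_touch": []}
--     lines = text.splitlines()
--     start = None
--     for i, line in enumerate(lines):
--         if line.strip().upper().startswith("SCOPE:"):
--             start = i + 1
--             break
--     if start is None:
--         return scope
--     body = lines[start:]
--     for j, line in enumerate(body):
--         if line.strip().upper().startswith(("DONE_WHEN:", "QUESTIONS:", "PLAN:", "LESSONS:", "INTENT:")):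
--             body = body[:j]
--             break
--     for line in body:
--         stripped = line.strip()
--         upper = stripped.upper()
--         core = upper[2:] if upper.startswith("- ") else upper
--         for key in ("MODIFY", "CREATE", "DO_NOT_TOUCH"):
--             if core.startswith(key + ":"):
--                 val = stripped.split(":", 1)[1].strip()
--                 scope[key.lower()] = [v.strip() for v in val.split(",") if v.strip()]
--                 break
--     return scope
-- ===== Notes on version B (the rewrite author's own statement) =====
-- stated objective: alternative
-- what changed: A's single stateful scan (in_scope flag, break, inline key tests) is replaced by a three-pass decomposition: locate the SCOPE header index, locate the terminator to slice out the body, then parse only the body lines, normalising the optional leading dash marker once so each key needs a single prefix test instead of two.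
import Mathlib
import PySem

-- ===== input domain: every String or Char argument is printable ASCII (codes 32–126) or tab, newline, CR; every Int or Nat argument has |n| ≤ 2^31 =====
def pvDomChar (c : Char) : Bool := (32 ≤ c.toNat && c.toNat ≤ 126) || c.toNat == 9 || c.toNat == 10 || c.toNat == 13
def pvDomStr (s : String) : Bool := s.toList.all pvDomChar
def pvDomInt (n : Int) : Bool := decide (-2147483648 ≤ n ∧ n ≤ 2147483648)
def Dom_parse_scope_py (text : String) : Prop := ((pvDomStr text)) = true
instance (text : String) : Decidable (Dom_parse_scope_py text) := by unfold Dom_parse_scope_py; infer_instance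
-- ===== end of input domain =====

-- B replaces A's single stateful scan (in_scope flag + break) by three separate passes —
-- locate the SCOPE header, locate the terminator to slice out the body, then parse only the
-- body lines (normalising the optional leading dash marker once instead of testing two patterns per key);
-- objective: alternative decomposition, same O(n) cost.

-- shared by both ports: the key list, the initial dict, and the value parser
-- (both Pythons compute stripped.split(":", 1)[1].strip() then the comma split/filter identically)
def pvKeys : List String := ["MODIFY", "CREATE", "DO_NOT_TOUCH"]

def pvInit : PySem.Dict String (List String) :=
  PySem.Dict.ofList [("modify", []), ("create", []), ("do_not_touch", [])]

def pvVal (stripped : String) : List String :=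
  let val := PySem.Str.strip
    (PySem.List.pyGetD ((PySem.Str.splitMax? stripped ":" 1).getD []) 1 "")
  (((PySem.Str.split? val ",").getD []).map PySem.Str.strip).filter (fun v => !(v == ""))

-- ===== PORT A =====
def pvTermsA : List String := ["DONE_WHEN", "QUESTIONS", "PLAN", "LESSONS", "INTENT"]

-- the inner 'for key in [...]' loop with break
def pvTryKeys : List String → String → PySem.Dict String (List String) → PySem.Dict String (List String)
  | [], _, scope => scope
  | key :: rest, stripped, scope =>
    if PySem.Str.startswith (PySem.Str.upper stripped) ("- " ++ key ++ ":")
        || PySem.Str.startswith (PySem.Str.upper stripped) (key ++ ":") then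
      PySem.Dict.insert scope (PySem.Str.lower key) (pvVal stripped)
    else pvTryKeys rest stripped scope

-- the 'for line in text.splitlines()' loop with the in_scope flag and break
def pvLoopA : List String → PySem.Dict String (List String) → Bool → PySem.Dict String (List String)
  | [], scope, _ => scope
  | line :: rest, scope, inScope =>
    let stripped := PySem.Str.strip line
    if PySem.Str.startswith (PySem.Str.upper stripped) "SCOPE:" then
      pvLoopA rest scope true
    else if inScope then
      if pvTermsA.any (fun s => PySem.Str.startswith (PySem.Str.upper stripped) (s ++ ":")) then
        scope
      else
        pvLoopA rest (pvTryKeys pvKeys stripped scope) inScope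
    else
      pvLoopA rest scope inScope

def parse_scope_py (text : String) : List (String × List String) :=
  (pvLoopA (PySem.Str.splitlines text) pvInit false).items

-- ===== PORT B =====
def pvTermsB : List String := ["DONE_WHEN:", "QUESTIONS:", "PLAN:", "LESSONS:", "INTENT:"]

-- pass 1: 'for i, line in enumerate(lines)' with break, start = i + 1
def pvFindStart : List String → Nat → Option Nat
  | [], _ => none
  | line :: rest, i =>
    if PySem.Str.startswith (PySem.Str.upper (PySem.Str.strip line)) "SCOPE:" then some (i + 1)
    else pvFindStart rest (i + 1)

-- pass 2: 'for j, line in enumerate(body)' with break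
def pvFindTerm : List String → Nat → Option Nat
  | [], _ => none
  | line :: rest, j =>
    if pvTermsB.any (fun t => PySem.Str.startswith (PySem.Str.upper (PySem.Str.strip line)) t) then
      some j
    else pvFindTerm rest (j + 1)

-- pass 3 body: 'for key in (...)' with break, one prefix test per key
def pvMatchKeys : List String → String → String →
    PySem.Dict String (List String) → PySem.Dict String (List String)
  | [], _, _, scope => scope
  | key :: rest, core, stripped, scope =>
    if PySem.Str.startswith core (key ++ ":") then
      PySem.Dict.insert scope (PySem.Str.lower key) (pvVal stripped)
    else pvMatchKeys rest core stripped scope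

def pvLineB (scope : PySem.Dict String (List String)) (line : String) :
    PySem.Dict String (List String) :=
  let stripped := PySem.Str.strip line
  let upper := PySem.Str.upper stripped
  let core := if PySem.Str.startswith upper "- " then PySem.Str.slice upper (some 2) none else upper
  pvMatchKeys pvKeys core stripped scope

def parse_scope_py_alt (text : String) : List (String × List String) :=
  let lines := PySem.Str.splitlines text
  match pvFindStart lines 0 with
  | none => pvInit.items
  | some start =>
    let body := PySem.List.slice lines (some (start : Int)) none
    let body2 :=
      match pvFindTerm body 0 with
      | none => body
      | some j => PySem.List.slice body none (some (j : Int))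
    (body2.foldl pvLineB pvInit).items

-- ===== PRECONDITION & SPEC =====
def Spec_parse_scope_py (text : String) (out : List (String × List String)) : Prop := out = parse_scope_py_alt text
instance (text : String) (out : List (String × List String)) : Decidable (Spec_parse_scope_py text out) := by unfold Spec_parse_scope_py; infer_instance

-- ===== CLAIM (what is proved, stated in full; the proofs are below) =====
def Claim_equal_parse_scope_py : Prop := ∀ (text : String), Dom_parse_scope_py text → Spec_parse_scope_py text (parse_scope_py text)

-- ===== LEMMAS AND PROOFS =====

-- generic: a prefix test against p ++ q splits at |p|
theorem pvIsPrefixOf_append (p q s : List Char) :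
    (p ++ q).isPrefixOf s = (p.isPrefixOf s && q.isPrefixOf (s.drop p.length)) := by
  induction p generalizing s with
  | nil => simp
  | cons a p ih =>
    cases s with
    | nil => simp [List.isPrefixOf]
    | cons b s => simp [List.isPrefixOf, ih, Bool.and_assoc]

-- startswith against "- " ++ k splits into the "- " test and the test of k on the tail slice
theorem pvSW1 (u k : String) :
    PySem.Str.startswith u ("- " ++ k)
      = (PySem.Str.startswith u "- "
          && PySem.Str.startswith (PySem.Str.slice u (some 2) none) k) := by
  simp only [PySem.Str.startswith_eq, PySem.Chars.startswith, PySem.Str.toList_slice,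
    PySem.Chars.slice_eq_listSlice, String.toList_append]
  rw [PySem.List.slice_from u.toList (by norm_num)]
  rw [pvIsPrefixOf_append]
  rfl

-- if u starts with p (first char c) and q's first char d differs, u does not start with q
theorem pvSW3 (u p q : String) (c d : Char) (cs ds : List Char)
    (hp : PySem.Str.startswith u p = true)
    (hcp : p.toList = c :: cs) (hdq : q.toList = d :: ds) (hne : (d == c) = false) :
    PySem.Str.startswith u q = false := by
  simp only [PySem.Str.startswith_eq, PySem.Chars.startswith, hcp, hdq] at *
  cases hu : u.toList with
  | nil => rw [hu] at hp; simp [List.isPrefixOf] at hp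
  | cons e es =>
    rw [hu] at hp
    simp only [List.isPrefixOf, Bool.and_eq_true, beq_iff_eq] at hp
    obtain ⟨rfl, -⟩ := hp
    simp [List.isPrefixOf, hne]

-- the two formulations of the terminator test agree
theorem pvTermEq (u : String) :
    pvTermsA.any (fun s => PySem.Str.startswith u (s ++ ":"))
      = pvTermsB.any (fun t => PySem.Str.startswith u t) := rfl

-- a SCOPE: header line is not a terminator line
theorem pvScopeNotTerm (u : String) (h : PySem.Str.startswith u "SCOPE:" = true) :
    pvTermsB.any (fun t => PySem.Str.startswith u t) = false := by
  simp only [pvTermsB, List.any_cons, List.any_nil, Bool.or_false]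
  rw [pvSW3 u "SCOPE:" "DONE_WHEN:" 'S' 'D' "COPE:".toList "ONE_WHEN:".toList h rfl rfl (by decide)]
  rw [pvSW3 u "SCOPE:" "QUESTIONS:" 'S' 'Q' "COPE:".toList "UESTIONS:".toList h rfl rfl (by decide)]
  rw [pvSW3 u "SCOPE:" "PLAN:" 'S' 'P' "COPE:".toList "LAN:".toList h rfl rfl (by decide)]
  rw [pvSW3 u "SCOPE:" "LESSONS:" 'S' 'L' "COPE:".toList "ESSONS:".toList h rfl rfl (by decide)]
  rw [pvSW3 u "SCOPE:" "INTENT:" 'S' 'I' "COPE:".toList "NTENT:".toList h rfl rfl (by decide)]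
  rfl

-- a SCOPE: header line matches no key in A's inner loop
theorem pvScopeNoKey (st : String) (scope : PySem.Dict String (List String))
    (h : PySem.Str.startswith (PySem.Str.upper st) "SCOPE:" = true) :
    pvTryKeys pvKeys st scope = scope := by
  simp only [pvKeys, pvTryKeys]
  rw [pvSW3 _ "SCOPE:" ("- " ++ "MODIFY" ++ ":") 'S' '-' "COPE:".toList " MODIFY:".toList h rfl (by decide) (by decide)]
  rw [pvSW3 _ "SCOPE:" ("MODIFY" ++ ":") 'S' 'M' "COPE:".toList "ODIFY:".toList h rfl (by decide) (by decide)]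
  rw [pvSW3 _ "SCOPE:" ("- " ++ "CREATE" ++ ":") 'S' '-' "COPE:".toList " CREATE:".toList h rfl (by decide) (by decide)]
  rw [pvSW3 _ "SCOPE:" ("CREATE" ++ ":") 'S' 'C' "COPE:".toList "REATE:".toList h rfl (by decide) (by decide)]
  rw [pvSW3 _ "SCOPE:" ("- " ++ "DO_NOT_TOUCH" ++ ":") 'S' '-' "COPE:".toList " DO_NOT_TOUCH:".toList h rfl (by decide) (by decide)]
  rw [pvSW3 _ "SCOPE:" ("DO_NOT_TOUCH" ++ ":") 'S' 'D' "COPE:".toList "O_NOT_TOUCH:".toList h rfl (by decide) (by decide)]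
  simp

-- one key test of A (two startswith) equals one key test of B (dash-normalised core)
theorem pvKeyTest (u kc : String) (c : Char) (cs : List Char)
    (hk : kc.toList = c :: cs) (hc : (c == '-') = false) :
    (PySem.Str.startswith u ("- " ++ kc) || PySem.Str.startswith u kc)
      = PySem.Str.startswith
          (if PySem.Str.startswith u "- " then PySem.Str.slice u (some 2) none else u) kc := by
  cases hd : PySem.Str.startswith u "- " with
  | true =>
    rw [pvSW1, hd, pvSW3 u "- " kc '-' c [' '] cs hd rfl hk hc]
    simp
  | false =>
    rw [pvSW1, hd]
    simp

-- core line lemma: B's per-line parser is A's inner key loop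
theorem pvLineEq (l : String) (scope : PySem.Dict String (List String)) :
    pvLineB scope l = pvTryKeys pvKeys (PySem.Str.strip l) scope := by
  unfold pvLineB
  simp only [pvKeys, pvTryKeys, pvMatchKeys]
  rw [show ("- " ++ "MODIFY" ++ ":" : String) = "- " ++ ("MODIFY" ++ ":") from rfl,
      show ("- " ++ "CREATE" ++ ":" : String) = "- " ++ ("CREATE" ++ ":") from rfl,
      show ("- " ++ "DO_NOT_TOUCH" ++ ":" : String) = "- " ++ ("DO_NOT_TOUCH" ++ ":") from rfl]
  simp only [pvKeyTest (PySem.Str.upper (PySem.Str.strip l)) ("MODIFY" ++ ":") 'M' "ODIFY:".toList (by decide) (by decide),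
             pvKeyTest (PySem.Str.upper (PySem.Str.strip l)) ("CREATE" ++ ":") 'C' "REATE:".toList (by decide) (by decide),
             pvKeyTest (PySem.Str.upper (PySem.Str.strip l)) ("DO_NOT_TOUCH" ++ ":") 'D' "O_NOT_TOUCH:".toList (by decide) (by decide)]

theorem pvFindTerm_shift (lines : List String) (i : Nat) :
    pvFindTerm lines (i + 1) = (pvFindTerm lines i).map (· + 1) := by
  induction lines generalizing i with
  | nil => rfl
  | cons l rest ih =>
    simp only [pvFindTerm]
    split
    · rfl
    · exact ih (i + 1)

theorem pvFindStart_shift (lines : List String) (i : Nat) :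
    pvFindStart lines (i + 1) = (pvFindStart lines i).map (· + 1) := by
  induction lines generalizing i with
  | nil => rfl
  | cons l rest ih =>
    simp only [pvFindStart]
    split
    · rfl
    · exact ih (i + 1)

-- B's phase 2 (truncate at terminator, fold the parser) as one function of the body
def pvPhase2 (body : List String) (scope : PySem.Dict String (List String)) :
    PySem.Dict String (List String) :=
  (match pvFindTerm body 0 with
   | none => body
   | some j => PySem.List.slice body none (some (j : Int))).foldl pvLineB scope

-- A's in-scope loop computes B's phase 2
set_option maxHeartbeats 1000000 in
theorem pvPhaseA2 (body : List String) (scope : PySem.Dict String (List String)) :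
    pvLoopA body scope true = pvPhase2 body scope := by
  induction body generalizing scope with
  | nil => rfl
  | cons l rest ih =>
    cases hS : PySem.Str.startswith (PySem.Str.upper (PySem.Str.strip l)) "SCOPE:" with
    | true =>
      have hT := pvScopeNotTerm _ hS
      have hL : pvLineB scope l = scope := by
        rw [pvLineEq]; exact pvScopeNoKey _ _ hS
      simp only [pvLoopA, pvPhase2, pvFindTerm, pvTermEq, hS, hT, if_true,
        Bool.false_eq_true, if_false, pvFindTerm_shift rest 0]
      rw [ih]
      simp only [pvPhase2]
      cases hft : pvFindTerm rest 0 with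
      | none => simp [hL]
      | some j =>
        simp only [Option.map_some]
        rw [PySem.List.slice_to _ (by positivity), PySem.List.slice_to _ (by positivity)]
        simp [Int.toNat_natCast, List.take_succ_cons, hL]
    | false =>
      cases hT : pvTermsB.any (fun t => PySem.Str.startswith (PySem.Str.upper (PySem.Str.strip l)) t) with
      | true =>
        simp only [pvLoopA, pvPhase2, pvFindTerm, pvTermEq, hS, hT, if_true,
          Bool.false_eq_true, if_false]
        rw [PySem.List.slice_to _ (by norm_num)]
        rfl
      | false =>
        simp only [pvLoopA, pvPhase2, pvFindTerm, pvTermEq, hS, hT, if_true,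
          Bool.false_eq_true, if_false, pvFindTerm_shift rest 0]
        rw [ih]
        simp only [pvPhase2]
        cases hft : pvFindTerm rest 0 with
        | none => simp [pvLineEq]
        | some j =>
          simp only [Option.map_some]
          rw [PySem.List.slice_to _ (by positivity), PySem.List.slice_to _ (by positivity)]
          simp [Int.toNat_natCast, List.take_succ_cons, pvLineEq]

-- A's full loop computes B's three-pass pipeline
theorem pvPhaseA1 (lines : List String) (scope : PySem.Dict String (List String)) :
    pvLoopA lines scope false
      = (match pvFindStart lines 0 with
         | none => scope
         | some s => pvPhase2 (PySem.List.slice lines (some (s : Int)) none) scope) := by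
  induction lines generalizing scope with
  | nil => rfl
  | cons l rest ih =>
    simp only [pvLoopA, pvFindStart]
    cases hS : PySem.Str.startswith (PySem.Str.upper (PySem.Str.strip l)) "SCOPE:" with
    | true =>
      simp only [if_true]
      rw [pvPhaseA2]
      rw [PySem.List.slice_from _ (by norm_num)]
      rfl
    | false =>
      simp only [Bool.false_eq_true, if_false, pvFindStart_shift rest 0]
      rw [ih]
      cases hfs : pvFindStart rest 0 with
      | none => simp
      | some s =>
        simp only [Option.map_some]
        rw [PySem.List.slice_from _ (by positivity), PySem.List.slice_from _ (by positivity)]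
        simp [Int.toNat_natCast, List.drop_succ_cons]

-- ===== VERDICT (by name: the statement is the Claim_ definition above) =====
theorem parse_scope_py_spec : Claim_equal_parse_scope_py := by
  intro text _
  unfold Spec_parse_scope_py parse_scope_py parse_scope_py_alt
  rw [pvPhaseA1]
  cases h : pvFindStart (PySem.Str.splitlines text) 0 with
  | none => simp [h]
  | some s => simp [h, pvPhase2]
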